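-- pv_equiv track=rewrite | github.com/RekGRpth/pydal | pydal/validators.py | nice
-- ===== SOURCE A (Python) =====
-- def nice(format):
--     code = (
--         ("%Y", "1963"),
--         ("%y", "63"),
--         ("%d", "28"),
--         ("%m", "08"),
--         ("%b", "Aug"),
--         ("%B", "August"),
--         ("%H", "14"),
--         ("%I", "02"),
--         ("%p", "PM"),
--         ("%M", "30"),
--         ("%S", "59"),
--     )
--     for a, b in code:
--         format = format.replace(a, b)
--     return dict(format=format)
-- ===== SOURCE B (Python) =====
-- def nice(format):
--     table = {
--         "Y": "1963", "y": "63", "d": "28", "m": "08", "b": "Aug",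
--         "B": "August", "H": "14", "I": "02", "p": "PM", "M": "30", "S": "59",
--     }
--     out = []
--     i = 0
--     n = len(format)
--     while i < n:
--         c = format[i]
--         if c == "%" and i + 1 < n and format[i + 1] in table:
--             out.append(table[format[i + 1]])
--             i += 2
--         else:
--             out.append(c)
--             i += 1
--     return {"format": "".join(out)}
-- ===== Notes on version B (the rewrite author's own statement) =====
-- stated objective: alternative
-- what changed: A rewrites the whole string 11 times, once per strftime code; B makes a single left-to-right scan with a code->sample lookup table, emitting each character or sample once (valid because no sample value contains '%', so no code can be created or destroyed between passes); trades the 11 C-level replace passes for one Python-level pass.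
import Mathlib
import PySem

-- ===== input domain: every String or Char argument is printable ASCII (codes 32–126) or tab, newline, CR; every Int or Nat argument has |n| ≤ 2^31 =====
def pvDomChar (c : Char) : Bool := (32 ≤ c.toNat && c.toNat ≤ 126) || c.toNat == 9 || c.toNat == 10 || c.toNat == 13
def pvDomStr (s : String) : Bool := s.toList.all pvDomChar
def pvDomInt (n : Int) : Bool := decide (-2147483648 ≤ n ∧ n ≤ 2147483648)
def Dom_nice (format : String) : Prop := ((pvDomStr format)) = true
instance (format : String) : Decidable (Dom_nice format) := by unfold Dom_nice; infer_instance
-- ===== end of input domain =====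

-- B replaces A's 11 sequential full-string replace passes by ONE left-to-right scan with a
-- code→sample lookup table (same return value; sound because no sample value contains '%').

-- ===== PORT A =====
def niceCode : List (String × String) :=
  [("%Y", "1963"), ("%y", "63"), ("%d", "28"), ("%m", "08"), ("%b", "Aug"),
   ("%B", "August"), ("%H", "14"), ("%I", "02"), ("%p", "PM"), ("%M", "30"), ("%S", "59")]

def nice (format : String) : List (String × String) :=
  [("format", niceCode.foldl (fun s p => PySem.Str.replace s p.1 p.2) format)]

-- ===== PORT B =====
-- Source B's table: strftime letter → sample value (values as code-point lists)
def niceTable : List (Char × List Char) :=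
  [('Y', ['1','9','6','3']), ('y', ['6','3']), ('d', ['2','8']), ('m', ['0','8']),
   ('b', ['A','u','g']), ('B', ['A','u','g','u','s','t']), ('H', ['1','4']), ('I', ['0','2']),
   ('p', ['P','M']), ('M', ['3','0']), ('S', ['5','9'])]

-- Source B's while loop: one pass; on '%'+known letter emit the sample and skip 2, else emit one char
def niceScan : List Char → List Char
  | [] => []
  | [c] => [c]
  | c :: d :: rest =>
    if c = '%' then
      match niceTable.lookup d with
      | some v => v ++ niceScan rest
      | none => c :: niceScan (d :: rest)
    else c :: niceScan (d :: rest)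
termination_by l => l.length

def nice_alt (format : String) : List (String × String) :=
  [("format", String.ofList (niceScan format.toList))]

-- ===== PRECONDITION & SPEC =====
def Spec_nice (format : String) (out : List (String × String)) : Prop := out = nice_alt format
instance (format : String) (out : List (String × String)) : Decidable (Spec_nice format out) := by unfold Spec_nice; infer_instance

-- ===== CLAIM (what is proved, stated in full; the proofs are below) =====
def Claim_equal_nice : Prop := ∀ (format : String), Dom_nice format → Spec_nice format (nice format)

-- ===== LEMMAS AND PROOFS =====

-- one replace pass with the two-char pattern ['%', x] and replacement r, as structural recursion
def rep1 (x : Char) (r : List Char) : List Char → List Char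
  | [] => []
  | [c] => [c]
  | c :: d :: t => if c = '%' ∧ d = x then r ++ rep1 x r t else c :: rep1 x r (d :: t)
termination_by l => l.length

-- A's 11 passes at the code-point level
def chain (L : List (Char × List Char)) (l : List Char) : List Char :=
  L.foldl (fun s p => rep1 p.1 p.2 s) l

lemma replace_go_two (x : Char) (r : List Char) :
    ∀ fuel l acc, l.length ≤ fuel →
      PySem.Chars.replace.go ['%', x] r fuel l acc = acc.reverse ++ rep1 x r l := by
  intro fuel
  induction fuel with
  | zero =>
    intro l acc h
    have : l = [] := by cases l <;> simp_all
    subst this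
    simp [PySem.Chars.replace.go, rep1]
  | succ f ih =>
    intro l acc h
    match l with
    | [] => simp [PySem.Chars.replace.go, rep1]
    | [c] =>
      rw [PySem.Chars.replace.go]
      have hpre : (['%', x].isPrefixOf [c]) = false := by simp [List.isPrefixOf]
      rw [hpre]
      simp only [Bool.false_eq_true, if_false]
      rw [ih [] (c :: acc) (by simp)]
      simp [rep1]
    | c :: d :: t =>
      rw [PySem.Chars.replace.go]
      by_cases hc : c = '%' ∧ d = x
      · have hpre : (['%', x].isPrefixOf (c :: d :: t)) = true := by
          simp [List.isPrefixOf, hc.1, hc.2]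
        rw [hpre]
        simp only [if_true]
        have hdrop : List.drop (['%', x].length) (c :: d :: t) = t := by simp
        rw [hdrop, ih t (r.reverse ++ acc) (by simp at h ⊢; omega)]
        simp [rep1, hc.1, hc.2]
      · have hpre : (['%', x].isPrefixOf (c :: d :: t)) = false := by
          simp [List.isPrefixOf]
          intro h1 h2
          exact absurd ⟨h1.symm, h2.symm⟩ hc
        rw [hpre]
        simp only [Bool.false_eq_true, if_false]
        rw [ih (d :: t) (c :: acc) (by simp at h ⊢; omega)]
        simp [rep1, hc]

lemma chars_replace_two (x : Char) (r s : List Char) :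
    PySem.Chars.replace s ['%', x] r = rep1 x r s := by
  unfold PySem.Chars.replace
  simp only [List.isEmpty_cons, Bool.false_eq_true, if_false]
  have := replace_go_two x r s.length s [] (le_refl _)
  simpa using this

lemma str_replace_two (s a r : String) (x : Char) (rc : List Char)
    (ha : a.toList = ['%', x]) (hr : r.toList = rc) :
    (PySem.Str.replace s a r).toList = rep1 x rc s.toList := by
  unfold PySem.Str.replace
  rw [String.toList_ofList, ha, hr, chars_replace_two]

lemma rep1_nil (x : Char) (r : List Char) : rep1 x r [] = [] := by simp [rep1]

lemma rep1_cons_ne (x : Char) (r : List Char) (c : Char) (hc : c ≠ '%') (w : List Char) :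
    rep1 x r (c :: w) = c :: rep1 x r w := by
  cases w <;> simp [rep1, hc]

lemma rep1_append_free (x : Char) (r : List Char) (p u : List Char) (hp : '%' ∉ p) :
    rep1 x r (p ++ u) = p ++ rep1 x r u := by
  induction p with
  | nil => rfl
  | cons a p' ih =>
    have ha : a ≠ '%' := fun h => hp (h ▸ List.mem_cons_self)
    rw [List.cons_append, rep1_cons_ne x r a ha, ih (fun h => hp (List.mem_cons_of_mem _ h))]
    simp

lemma chain_nil (L : List (Char × List Char)) : chain L [] = [] := by
  induction L with
  | nil => rfl
  | cons p L' ih => simpa [chain, rep1_nil] using ih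

lemma chain_append_free (L : List (Char × List Char)) (p : List Char) (hp : '%' ∉ p) :
    ∀ u, chain L (p ++ u) = p ++ chain L u := by
  induction L with
  | nil => intro u; rfl
  | cons q L' ih =>
    intro u
    show chain L' (rep1 q.1 q.2 (p ++ u)) = p ++ chain L' (rep1 q.1 q.2 u)
    rw [rep1_append_free q.1 q.2 p u hp, ih (rep1 q.1 q.2 u)]

lemma chain_cons_ne (L : List (Char × List Char)) (c : Char) (hc : c ≠ '%') (u : List Char) :
    chain L (c :: u) = c :: chain L u := by
  have := chain_append_free L [c] (by simpa using Ne.symm hc) u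
  simpa using this

-- table facts, checked by the kernel
lemma table_val_free (p : Char × List Char) (hp : p ∈ niceTable) : '%' ∉ p.2 := by
  fin_cases hp <;> decide

lemma table_val_head (p : Char × List Char) (hp : p ∈ niceTable) :
    niceTable.lookup (p.2.headD '%') = none := by
  fin_cases hp <;> decide

lemma table_val_ne_nil (p : Char × List Char) (hp : p ∈ niceTable) : p.2 ≠ [] := by
  fin_cases hp <;> decide

lemma table_key_some (p : Char × List Char) (hp : p ∈ niceTable) :
    (niceTable.lookup p.1).isSome := by
  fin_cases hp <;> decide

lemma lookup_pct : niceTable.lookup '%' = none := by decide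

-- a string is safe if its head cannot start a code after a preceding '%'
def SafeHead (u : List Char) : Prop :=
  ∀ c, u.head? = some c → c = '%' ∨ niceTable.lookup c = none

lemma safe_nil : SafeHead [] := by intro c h; simp at h

lemma rep1_pct (x : Char) (r : List Char) (hx : (niceTable.lookup x).isSome)
    (u : List Char) (hs : SafeHead u) :
    rep1 x r ('%' :: u) = '%' :: rep1 x r u := by
  cases u with
  | nil => simp [rep1]
  | cons d t =>
    have hd : d ≠ x := by
      intro hdx
      have hx' : (niceTable.lookup d).isSome := by rw [hdx]; exact hx
      rcases hs d rfl with h1 | h1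
      · rw [h1, lookup_pct] at hx'; simp at hx'
      · rw [h1] at hx'; simp at hx'
    simp [rep1, hd]

lemma rep1_safe (p : Char × List Char) (hp : p ∈ niceTable) (u : List Char) (hs : SafeHead u) :
    SafeHead (rep1 p.1 p.2 u) := by
  match u with
  | [] =>
    rw [show rep1 p.1 p.2 ([] : List Char) = [] from by simp [rep1]]
    exact safe_nil
  | [c] => exact fun e he => hs e (by simpa [rep1] using he)
  | c :: d :: t =>
    by_cases hc : c = '%' ∧ d = p.1
    · intro e he
      rw [show rep1 p.1 p.2 (c :: d :: t) = p.2 ++ rep1 p.1 p.2 t by simp [rep1, hc]] at he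
      have hne := table_val_ne_nil p hp
      right
      have : e = p.2.headD '%' := by
        cases hv : p.2 with
        | nil => exact absurd hv hne
        | cons a l => rw [hv] at he; simp at he; subst he; simp
      rw [this]
      exact table_val_head p hp
    · intro e he
      rw [show rep1 p.1 p.2 (c :: d :: t) = c :: rep1 p.1 p.2 (d :: t) by simp [rep1, hc]] at he
      simp at he
      exact hs e (by simp [he])

lemma chain_pct (L : List (Char × List Char)) (hL : ∀ p ∈ L, p ∈ niceTable) :
    ∀ u, SafeHead u → chain L ('%' :: u) = '%' :: chain L u := by
  induction L with
  | nil => intro u _; rfl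
  | cons q L' ih =>
    intro u hs
    have hq := hL q List.mem_cons_self
    show chain L' (rep1 q.1 q.2 ('%' :: u)) = '%' :: chain L' (rep1 q.1 q.2 u)
    rw [rep1_pct q.1 q.2 (table_key_some q hq) u hs]
    exact ih (fun p hp => hL p (List.mem_cons_of_mem _ hp)) (rep1 q.1 q.2 u) (rep1_safe q hq u hs)

lemma chain_match (d : Char) (v : List Char) :
    ∀ (L : List (Char × List Char)), (∀ p ∈ L, p ∈ niceTable) → L.lookup d = some v →
      d ≠ '%' → ∀ u, chain L ('%' :: d :: u) = v ++ chain L u := by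
  intro L
  induction L with
  | nil => intro _ hlk; simp [List.lookup] at hlk
  | cons q L' ih =>
    intro hL hlk hd u
    obtain ⟨a, b⟩ := q
    have hq : (a, b) ∈ niceTable := hL _ List.mem_cons_self
    by_cases hxd : a = d
    · subst hxd
      have hv : b = v := by simpa [List.lookup] using hlk
      show chain L' (rep1 a b ('%' :: a :: u)) = v ++ chain L' (rep1 a b u)
      rw [show rep1 a b ('%' :: a :: u) = b ++ rep1 a b u from by simp [rep1]]
      rw [chain_append_free L' b (table_val_free (a, b) hq), hv]
    · have hne : (d == a) = false := by
        simp only [beq_eq_false_iff_ne, ne_eq]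
        exact fun h => hxd h.symm
      have hlk' : L'.lookup d = some v := by simpa [List.lookup, hne] using hlk
      show chain L' (rep1 a b ('%' :: d :: u)) = v ++ chain L' (rep1 a b u)
      rw [show rep1 a b ('%' :: d :: u) = '%' :: d :: rep1 a b u from by
            simp [rep1, show ¬(d = a) from fun h => hxd h.symm, rep1_cons_ne a b d hd]]
      exact ih (fun p hp => hL p (List.mem_cons_of_mem _ hp)) hlk' hd (rep1 a b u)

lemma chain_eq_scan (l : List Char) : chain niceTable l = niceScan l := by
  induction l using niceScan.induct with
  | case1 => rw [chain_nil]; simp [niceScan]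
  | case2 c =>
    by_cases hc : c = '%'
    · subst hc
      rw [show (['%'] : List Char) = '%' :: ([] : List Char) from rfl,
          chain_pct niceTable (fun p hp => hp) [] safe_nil, chain_nil]
      simp [niceScan]
    · rw [chain_cons_ne niceTable c hc, chain_nil]; simp [niceScan]
  | case3 d rest v hlk ih =>
    have hd : d ≠ '%' := by
      intro h; rw [h, lookup_pct] at hlk; exact absurd hlk (by simp)
    rw [chain_match d v niceTable (fun p hp => hp) hlk hd rest, ih]
    simp [niceScan, hlk]
  | case4 d rest hlk ih =>
    have hsafe : SafeHead (d :: rest) := by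
      intro e he; simp at he; subst he; right; exact hlk
    rw [chain_pct niceTable (fun p hp => hp) (d :: rest) hsafe, ih]
    simp [niceScan, hlk]
  | case5 c d rest hc ih =>
    rw [chain_cons_ne niceTable c hc, ih]
    simp [niceScan, hc]

lemma foldA_toList (s : String) :
    (niceCode.foldl (fun t p => PySem.Str.replace t p.1 p.2) s).toList =
      chain niceTable s.toList := by
  simp only [niceCode, List.foldl_cons, List.foldl_nil]
  rw [str_replace_two _ _ _ 'S' ['5','9'] (by decide) (by decide),
      str_replace_two _ _ _ 'M' ['3','0'] (by decide) (by decide),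
      str_replace_two _ _ _ 'p' ['P','M'] (by decide) (by decide),
      str_replace_two _ _ _ 'I' ['0','2'] (by decide) (by decide),
      str_replace_two _ _ _ 'H' ['1','4'] (by decide) (by decide),
      str_replace_two _ _ _ 'B' ['A','u','g','u','s','t'] (by decide) (by decide),
      str_replace_two _ _ _ 'b' ['A','u','g'] (by decide) (by decide),
      str_replace_two _ _ _ 'm' ['0','8'] (by decide) (by decide),
      str_replace_two _ _ _ 'd' ['2','8'] (by decide) (by decide),
      str_replace_two _ _ _ 'y' ['6','3'] (by decide) (by decide),
      str_replace_two _ _ _ 'Y' ['1','9','6','3'] (by decide) (by decide)]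
  simp [chain, niceTable, List.foldl_cons, List.foldl_nil]

-- ===== VERDICT (by name: the statement is the Claim_ definition above) =====
theorem nice_spec : Claim_equal_nice := by
  intro format _
  unfold Spec_nice nice nice_alt
  have h : (niceCode.foldl (fun t p => PySem.Str.replace t p.1 p.2) format).toList =
      niceScan format.toList := by
    rw [foldA_toList, chain_eq_scan]
  rw [← h, String.ofList_toList]
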